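-- pv_equiv track=rewrite | github.com/pavxxx/Cryptar | app.py | unique_letters_rtl
-- ===== SOURCE A (Python) =====
-- def unique_letters_rtl(words, result):
--     seen, out = set(), []
--     max_len = max([len(w) for w in words] + [len(result)])
--     for i in range(1, max_len + 1):
--         for w in words + [result]:
--             if i <= len(w):
--                 c = w[-i]
--                 if c not in seen:
--                     seen.add(c)
--                     out.append(c)
--     return out
-- ===== SOURCE B (Python) =====
-- def unique_letters_rtl(words, result):
--     # Sort-based: one row-major pass assigns each character occurrence its
--     # column-major rank (column * n + word index), sort by rank, ordered dedup.
--     ws = words + [result]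
--     n = len(ws)
--     occ = [((len(w) - k) * n + j, c) for j, w in enumerate(ws) for k, c in enumerate(w)]
--     occ.sort(key=lambda t: t[0])
--     return list(dict.fromkeys(c for _, c in occ))
-- ===== Notes on version B (the rewrite author's own statement) =====
-- stated objective: faster
-- what changed: Replaces A's column-by-column rescan of every word (max_len passes over the whole word list) with a sort-based algorithm: one row-major pass assigns each character occurrence its column-major rank (column*n + word index), the occurrences are sorted by rank, and the answer is the ordered dedup (dict.fromkeys) of the sorted characters.
import Mathlib
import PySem

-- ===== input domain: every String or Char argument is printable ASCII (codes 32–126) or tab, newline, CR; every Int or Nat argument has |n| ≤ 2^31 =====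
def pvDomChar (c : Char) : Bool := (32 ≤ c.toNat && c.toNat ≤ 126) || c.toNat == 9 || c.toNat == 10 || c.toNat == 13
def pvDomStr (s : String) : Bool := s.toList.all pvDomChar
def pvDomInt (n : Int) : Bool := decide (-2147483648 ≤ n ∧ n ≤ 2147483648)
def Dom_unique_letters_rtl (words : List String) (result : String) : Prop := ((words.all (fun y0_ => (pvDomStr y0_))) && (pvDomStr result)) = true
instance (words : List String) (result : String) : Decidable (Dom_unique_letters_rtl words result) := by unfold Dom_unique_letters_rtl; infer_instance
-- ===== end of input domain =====

-- B replaces A's column-by-column rescan of all words by a sort-based algorithm: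
-- one row-major pass ranks every character occurrence by column*n + word index,
-- sorts by rank and takes the ordered dedup. Python characters are modelled as
-- Char and wrapped back to one-char Strings at the very end, identically in both ports.

-- ===== PORT A =====
-- A's inner 'for w in words + [result]' loop at column i (i = 1..max_len).
def uaStep (ws : List (List Char)) (st : PySem.Set Char × List Char) (i : Int) :
    PySem.Set Char × List Char :=
  ws.foldl (fun st w =>
    if i ≤ PySem.List.len w then
      let c := PySem.List.pyGetD w (-i) ' '          -- w[-i], in range under the guard
      if PySem.Set.contains st.1 c then st
      else (PySem.Set.add st.1 c, st.2 ++ [c])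
    else st) st

def unique_letters_rtl (words : List String) (result : String) : List String :=
  let maxLen : Nat := ((words.map (fun w => w.toList.length)) ++ [result.toList.length]).foldl Nat.max 0
  let ws : List (List Char) := (words ++ [result]).map String.toList
  let fin := (PySem.List.pyRange 1 ((maxLen : Int) + 1)).foldl (fun st i => uaStep ws st i)
    (PySem.Set.ofList [], [])
  fin.2.map (fun c => String.ofList [c])

-- ===== PORT B =====
def unique_letters_rtl_alt (words : List String) (result : String) : List String :=
  let ws : List (List Char) := (words ++ [result]).map String.toList
  let n : Int := PySem.List.len ws
  -- occ = [((len(w) - k) * n + j, c) for j, w in enumerate(ws) for k, c in enumerate(w)]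
  let occ : List (Int × Char) :=
    (PySem.List.enumerate ws).flatMap (fun jw =>
      (PySem.List.enumerate jw.2).map (fun kc =>
        ((PySem.List.len jw.2 - kc.1) * n + jw.1, kc.2)))
  -- occ.sort(key=lambda t: t[0])
  let occS := PySem.List.sorted occ (fun t => t.1)
  -- list(dict.fromkeys(c for _, c in occS))
  (PySem.List.dedup (occS.map (fun t => t.2))).map (fun c => String.ofList [c])

-- ===== PRECONDITION & SPEC =====
def Spec_unique_letters_rtl (words : List String) (result : String) (out : List String) : Prop := out = unique_letters_rtl_alt words result
instance (words : List String) (result : String) (out : List String) : Decidable (Spec_unique_letters_rtl words result out) := by unfold Spec_unique_letters_rtl; infer_instance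

-- ===== CLAIM (what is proved, stated in full; the proofs are below) =====
def Claim_equal_unique_letters_rtl : Prop := ∀ (words : List String) (result : String), Dom_unique_letters_rtl words result → Spec_unique_letters_rtl words result (unique_letters_rtl words result)

-- ===== LEMMAS AND PROOFS =====

-- the common per-character update of A: seen/out after 'if c not in seen: add/append'
def upd (st : PySem.Set Char × List Char) (c : Char) : PySem.Set Char × List Char :=
  if PySem.Set.contains st.1 c then st else (PySem.Set.add st.1 c, st.2 ++ [c])

-- proof-side: column i of the ranked occurrence list, in word order
def colP (ws : List (List Char)) (n i : Int) : List (Int × Char) :=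
  ((PySem.List.enumerate ws).filter (fun jw => decide (i ≤ PySem.List.len jw.2))).map
    (fun jw => (i * n + jw.1, PySem.List.pyGetD jw.2 (-i) ' '))

-- proof-side: the ranked occurrences in column-major order
def Lc (ws : List (List Char)) (n : Int) (M : Nat) : List (Int × Char) :=
  (PySem.List.pyRange 1 ((M : Int) + 1)).flatMap (colP ws n)

theorem uaStep_eq_foldl_upd (ws : List (List Char)) (st : PySem.Set Char × List Char) (i : Int) :
    uaStep ws st i
      = ((ws.filter (fun w => decide (i ≤ PySem.List.len w))).map
          (fun w => PySem.List.pyGetD w (-i) ' ')).foldl upd st := by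
  unfold uaStep
  rw [show (fun (st : PySem.Set Char × List Char) (w : List Char) =>
        if i ≤ PySem.List.len w then
          let c := PySem.List.pyGetD w (-i) ' '
          if PySem.Set.contains st.1 c then st
          else (PySem.Set.add st.1 c, st.2 ++ [c])
        else st)
      = fun st w => if i ≤ PySem.List.len w then upd st (PySem.List.pyGetD w (-i) ' ') else st
      from rfl,
    PySem.List.foldl_ite_eq_foldl_filter, List.foldl_map]

theorem foldl_upd_pair (l : List Char) (s : PySem.Set Char) :
    l.foldl upd (s, s) = (l.foldl PySem.Set.add s, l.foldl PySem.Set.add s) := by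
  induction l generalizing s with
  | nil => rfl
  | cons c t ih =>
    have h : upd (s, s) c = (PySem.Set.add s c, PySem.Set.add s c) := by
      simp only [upd, PySem.Set.add]
      split_ifs <;> rfl
    simp only [List.foldl_cons, h, ih]

theorem enc_eq_iff (n i1 i2 j1 j2 : Int) (h1 : 0 ≤ j1) (h2 : j1 < n) (h3 : 0 ≤ j2) (h4 : j2 < n)
    (h : i1 * n + j1 = i2 * n + j2) : i1 = i2 ∧ j1 = j2 := by
  have hd : (i1 - i2) * n = j2 - j1 := by linarith [h]
  have hdvd : n ∣ (j2 - j1) := ⟨i1 - i2, by linarith [hd]⟩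
  have hj : j2 - j1 = 0 := by
    rcases hdvd with ⟨c, hc⟩
    rcases lt_trichotomy c 0 with hcc | rfl | hcc
    · nlinarith
    · simpa using hc
    · nlinarith
  have hn : n ≠ 0 := by omega
  constructor
  · have : (i1 - i2) * n = 0 := by omega
    rcases mul_eq_zero.mp this with h' | h' <;> omega
  · omega

theorem colP_map_snd (ws : List (List Char)) (n i : Int) :
    (colP ws n i).map (fun t => t.2)
      = (ws.filter (fun w => decide (i ≤ PySem.List.len w))).map
          (fun w => PySem.List.pyGetD w (-i) ' ') := by
  unfold colP
  conv_rhs => rw [← PySem.List.map_snd_enumerate ws 0, List.filter_map, List.map_map]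
  rw [List.map_map]
  rfl

theorem key_of_mem_colP (ws : List (List Char)) (n i : Int) (x : Int × Char)
    (hx : x ∈ colP ws n i) : ∃ j : Int, 0 ≤ j ∧ j < (ws.length : Int) ∧ x.1 = i * n + j := by
  unfold colP at hx
  rcases List.mem_map.mp hx with ⟨jw, hjw, rfl⟩
  have hmem := (List.mem_filter.mp hjw).1
  rcases (PySem.List.mem_enumerate_iff ws 0 jw).mp hmem with ⟨k, hk, rfl⟩
  exact ⟨(k : Int), by positivity, by exact_mod_cast hk, by simp⟩

theorem Lc_pairwise (ws : List (List Char)) (M : Nat) :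
    (Lc ws (ws.length : Int) M).Pairwise (fun a b => a.1 < b.1) := by
  unfold Lc
  rw [List.pairwise_flatMap]
  constructor
  · intro i _
    unfold colP
    refine List.Pairwise.map _ ?_
      (List.Pairwise.filter _ (PySem.List.pairwise_lt_enumerate ws 0))
    intro a b hab
    simpa using add_lt_add_left hab (i * (ws.length : Int))
  · have h := PySem.List.pairwise_lt_pyRange_one 1 ((M : Int) + 1)
    refine h.imp ?_
    intro i1 i2 h12 x hx y hy
    rcases key_of_mem_colP ws _ i1 x hx with ⟨j1, hj1, hj1', hx1⟩
    rcases key_of_mem_colP ws _ i2 y hy with ⟨j2, hj2, hj2', hy1⟩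
    rw [hx1, hy1]
    have hstep : (i1 + 1) * (ws.length : Int) ≤ i2 * (ws.length : Int) :=
      mul_le_mul_of_nonneg_right (by omega) (by positivity)
    nlinarith

theorem mem_inner_iff (w : List Char) (n j : Int) (x : Int × Char) :
    x ∈ (PySem.List.enumerate w).map (fun kc => ((PySem.List.len w - kc.1) * n + j, kc.2))
      ↔ ∃ (k : Nat) (hk : k < w.length),
          x = (((w.length : Int) - (k : Int)) * n + j, w[k]) := by
  constructor
  · intro hx
    rcases List.mem_map.mp hx with ⟨kc, hkc, rfl⟩
    rcases (PySem.List.mem_enumerate_iff w 0 kc).mp hkc with ⟨k, hk, rfl⟩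
    exact ⟨k, hk, by simp [PySem.List.len_eq]⟩
  · rintro ⟨k, hk, rfl⟩
    refine List.mem_map.mpr ⟨((k : Int), w[k]), ?_, by simp [PySem.List.len_eq]⟩
    exact (PySem.List.mem_enumerate_iff w 0 _).mpr ⟨k, hk, by simp⟩

theorem occ_nodup (ws : List (List Char)) (hw : ws ≠ []) :
    ((PySem.List.enumerate ws).flatMap (fun jw =>
      (PySem.List.enumerate jw.2).map (fun kc =>
        ((PySem.List.len jw.2 - kc.1) * (ws.length : Int) + jw.1, kc.2)))).Nodup := by
  have hn : (0 : Int) < (ws.length : Int) := by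
    have := List.length_pos_iff.mpr hw
    exact_mod_cast this
  rw [List.nodup_iff_pairwise_ne, List.pairwise_flatMap]
  constructor
  · intro jw hjw
    rcases (PySem.List.mem_enumerate_iff ws 0 jw).mp hjw with ⟨j, hj, rfl⟩
    refine List.Pairwise.map _ ?_ (PySem.List.pairwise_lt_enumerate _ 0)
    intro a b hab heq
    have hkey := congrArg Prod.fst heq
    simp only [PySem.List.len_eq] at hkey
    have := (enc_eq_iff _ _ _ _ _ (by positivity) (by omega)
      (by positivity) (by omega) hkey).1
    omega
  · have hpw := List.Pairwise.and_mem.mp (PySem.List.pairwise_lt_enumerate ws 0)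
    refine hpw.imp ?_
    rintro jw1 jw2 ⟨hm1, hm2, h12⟩ x hx y hy heq
    rcases (PySem.List.mem_enumerate_iff ws 0 jw1).mp hm1 with ⟨j1, hj1, hjw1⟩
    rcases (PySem.List.mem_enumerate_iff ws 0 jw2).mp hm2 with ⟨j2, hj2, hjw2⟩
    rcases (mem_inner_iff jw1.2 (ws.length : Int) jw1.1 x).mp (by
      simpa [PySem.List.len_eq] using hx) with ⟨k1, hk1, hx1⟩
    rcases (mem_inner_iff jw2.2 (ws.length : Int) jw2.1 y).mp (by
      simpa [PySem.List.len_eq] using hy) with ⟨k2, hk2, hy1⟩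
    rw [heq] at hx1
    have hkey := congrArg Prod.fst (hx1.symm.trans hy1)
    simp only at hkey
    have hb1 : (0:Int) ≤ jw1.1 ∧ jw1.1 < (ws.length : Int) := by
      rw [hjw1]; constructor <;> [simp; (simp; omega)]
    have hb2 : (0:Int) ≤ jw2.1 ∧ jw2.1 < (ws.length : Int) := by
      rw [hjw2]; constructor <;> [simp; (simp; omega)]
    have := (enc_eq_iff _ _ _ _ _ hb1.1 hb1.2 hb2.1 hb2.2 hkey).2
    omega

theorem Lc_perm_occ (ws : List (List Char)) (M : Nat) (hw : ws ≠ [])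
    (hM : ∀ w ∈ ws, w.length ≤ M) :
    (Lc ws (ws.length : Int) M).Perm
      ((PySem.List.enumerate ws).flatMap (fun jw =>
        (PySem.List.enumerate jw.2).map (fun kc =>
          ((PySem.List.len jw.2 - kc.1) * (ws.length : Int) + jw.1, kc.2)))) := by
  have hnodupL : (Lc ws (ws.length : Int) M).Nodup := by
    rw [List.nodup_iff_pairwise_ne]
    exact (Lc_pairwise ws M).imp (fun h heq => by simp [heq] at h)
  rw [List.perm_ext_iff_of_nodup hnodupL (occ_nodup ws hw)]
  intro x
  constructor
  · intro hx
    rcases List.mem_flatMap.mp hx with ⟨i, hi, hxc⟩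
    rw [PySem.List.mem_pyRange_one] at hi
    unfold colP at hxc
    rcases List.mem_map.mp hxc with ⟨jw, hjw, rfl⟩
    have hfil := List.mem_filter.mp hjw
    have hilen : i ≤ ((jw.2).length : Int) := by
      have := of_decide_eq_true hfil.2
      simpa [PySem.List.len_eq] using this
    refine List.mem_flatMap.mpr ⟨jw, hfil.1,
      (mem_inner_iff jw.2 (ws.length : Int) jw.1 _).mpr
        ⟨jw.2.length - i.toNat, by omega, ?_⟩⟩
    have hcast : ((jw.2.length - i.toNat : Nat) : Int) = (jw.2.length : Int) - i := by omega
    have hieq : -i = -((i.toNat : Nat) : Int) := by omega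
    have hchar : PySem.List.pyGetD jw.2 (-i) ' ' = jw.2[jw.2.length - i.toNat] := by
      rw [hieq, PySem.List.pyGetD_neg_natCast jw.2 i.toNat ' ' (by omega) (by omega)]
    rw [hchar, hcast]
    congr 1
    ring
  · intro hx
    rcases List.mem_flatMap.mp hx with ⟨jw, hjw, hxi⟩
    rcases (mem_inner_iff jw.2 (ws.length : Int) jw.1 x).mp (by
      simpa [PySem.List.len_eq] using hxi) with ⟨k, hk, rfl⟩
    rcases (PySem.List.mem_enumerate_iff ws 0 jw).mp hjw with ⟨j, hj, hjweq⟩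
    have hwmem : jw.2 ∈ ws := by
      rw [hjweq]; exact List.getElem_mem hj
    have hlen : jw.2.length ≤ M := hM jw.2 hwmem
    refine List.mem_flatMap.mpr ⟨(jw.2.length : Int) - k, ?_, ?_⟩
    · rw [PySem.List.mem_pyRange_one]; omega
    · unfold colP
      refine List.mem_map.mpr ⟨jw, List.mem_filter.mpr ⟨hjw, by
        simp [PySem.List.len_eq]⟩, ?_⟩
      have hieq : -((jw.2.length : Int) - k) = -(((jw.2.length - k : Nat) : Nat) : Int) := by omega
      have hchar : PySem.List.pyGetD jw.2 (-((jw.2.length : Int) - k)) ' '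
          = jw.2[k] := by
        rw [hieq, PySem.List.pyGetD_neg_natCast jw.2 (jw.2.length - k) ' ' (by omega) (by omega)]
        have : jw.2.length - (jw.2.length - k) = k := by omega
        simp [this]
      rw [hchar]

-- the whole equivalence, over the shared word list and A's maximal length
theorem main_aux (ws : List (List Char)) (M : Nat) (hw : ws ≠ [])
    (hM : ∀ w ∈ ws, w.length ≤ M) :
    ((PySem.List.pyRange 1 ((M : Int) + 1)).foldl (fun st i => uaStep ws st i)
      (PySem.Set.ofList [], [])).2
    = PySem.List.dedup
        ((PySem.List.sorted
          ((PySem.List.enumerate ws).flatMap (fun jw =>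
            (PySem.List.enumerate jw.2).map (fun kc =>
              ((PySem.List.len jw.2 - kc.1) * (ws.length : Int) + jw.1, kc.2))))
          (fun t => t.1)).map (fun t => t.2)) := by
  have hB := PySem.List.sorted_eq_of_perm_of_pairwise_lt _ _ (fun t : Int × Char => t.1)
    (Lc_perm_occ ws M hw hM) (Lc_pairwise ws M)
  rw [hB]
  have hstep : (fun (st : PySem.Set Char × List Char) (i : Int) => uaStep ws st i)
      = fun st i => ((ws.filter (fun w => decide (i ≤ PySem.List.len w))).map
          (fun w => PySem.List.pyGetD w (-i) ' ')).foldl upd st := by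
    funext st i
    exact uaStep_eq_foldl_upd ws st i
  rw [hstep]
  rw [show (Lc ws (ws.length : Int) M).map (fun t => t.2)
      = (PySem.List.pyRange 1 ((M : Int) + 1)).flatMap
          (fun i => (ws.filter (fun w => decide (i ≤ PySem.List.len w))).map
            (fun w => PySem.List.pyGetD w (-i) ' ')) by
    unfold Lc
    rw [List.map_flatMap]
    exact List.flatMap_congr (fun i _ => colP_map_snd ws (ws.length : Int) i)]
  rw [← List.foldl_flatMap]
  rw [show ((PySem.Set.ofList [] : PySem.Set Char), ([] : List Char))
      = (([] : PySem.Set Char), ([] : List Char)) from rfl, foldl_upd_pair]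
  rw [PySem.List.dedup_eq_ofList, PySem.Set.ofList_eq_foldl]

-- ===== VERDICT (by name: the statement is the Claim_ definition above) =====
theorem unique_letters_rtl_spec : Claim_equal_unique_letters_rtl := by
  intro words result _
  unfold Spec_unique_letters_rtl unique_letters_rtl unique_letters_rtl_alt
  dsimp only
  rw [PySem.List.len_eq]
  congr 1
  apply main_aux
  · simp
  · intro w hwmem
    have h := (PySem.List.le_foldl_max_nat
      (((words ++ [result]).map String.toList).map List.length) id 0).2 w.length
      (List.mem_map_of_mem hwmem)
    have hlens : (words.map (fun w => w.toList.length)) ++ [result.toList.length]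
        = ((words ++ [result]).map String.toList).map List.length := by
      simp [Function.comp]
    rw [hlens]
    exact h
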